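-- pv_equiv track=rewrite | github.com/V1ctor2182/stockbee-big | src/stockbee/news_data/sync.py | _dedup_cross_source
-- ===== SOURCE A (Python) =====
-- def _normalize_headline(headline: str) -> str:
--     """Headline 归一化用于去重比较。lowercase + collapse whitespace。"""
--     return " ".join(headline.lower().split())
--
-- def _dedup_cross_source(events: list[dict]) -> list[dict]:
--     """跨源去重：headline normalize 后精确匹配，保留 snippet 最长的一条。"""
--     seen: dict[str, dict] = {}
--     for event in events:
--         headline = event.get("headline", "")
--         if not headline:
--             continue
--         key = _normalize_headline(headline)
--         if key not in seen:
--             seen[key] = event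
--         else:
--             # 保留 snippet 更长的，或时间更早的
--             existing = seen[key]
--             existing_snippet = existing.get("snippet") or ""
--             new_snippet = event.get("snippet") or ""
--             if len(new_snippet) > len(existing_snippet):
--                 seen[key] = event
--     return list(seen.values())
-- ===== SOURCE B (Python) =====
-- def _normalize_headline(headline: str) -> str:
--     return " ".join(headline.lower().split())
--
-- def _dedup_cross_source(events: list[dict]) -> list[dict]:
--     groups: dict[str, list[dict]] = {}
--     for event in events:
--         headline = event.get("headline", "")
--         if not headline:
--             continue
--         groups.setdefault(_normalize_headline(headline), []).append(event)
--     return [max(g, key=lambda e: len(e.get("snippet") or "")) for g in groups.values()]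
-- ===== Notes on version B (the rewrite author's own statement) =====
-- stated objective: alternative
-- what changed: Replaces A's single pass that maintains a running best event per normalized headline with a two-phase group-then-reduce: first bucket all events by normalized headline, then take the first longest-snippet event of each bucket with max().
import Mathlib
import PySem

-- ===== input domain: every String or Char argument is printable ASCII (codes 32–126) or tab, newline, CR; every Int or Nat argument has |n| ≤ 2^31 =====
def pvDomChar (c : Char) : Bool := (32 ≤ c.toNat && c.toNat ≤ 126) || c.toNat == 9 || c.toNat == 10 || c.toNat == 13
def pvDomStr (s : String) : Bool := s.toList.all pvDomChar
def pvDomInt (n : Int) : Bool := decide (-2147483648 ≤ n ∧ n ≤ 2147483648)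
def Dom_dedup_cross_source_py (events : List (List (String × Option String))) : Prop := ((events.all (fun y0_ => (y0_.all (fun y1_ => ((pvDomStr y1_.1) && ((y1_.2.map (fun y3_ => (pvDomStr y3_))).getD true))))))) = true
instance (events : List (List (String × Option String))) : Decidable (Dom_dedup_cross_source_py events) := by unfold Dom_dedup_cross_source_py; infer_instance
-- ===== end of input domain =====

-- B replaces A's running-best pass with a two-phase group-then-reduce (bucket by normalized headline, then pick each bucket's first longest-snippet event); alternative decomposition, same cost.

-- ===== PORT A =====
-- _normalize_headline: " ".join(headline.lower().split())
def pvNorm (headline : String) : String :=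
  PySem.Str.join " " (PySem.Str.split₀ (PySem.Str.lower headline))

-- headline = event.get("headline", ""); if not headline: continue  (None and "" are falsy)
def pvHead? (event : List (String × Option String)) : Option String :=
  match (PySem.Dict.mk event).get? "headline" with
  | some (some h) => if h = "" then none else some h
  | _ => none

-- event.get("snippet") or ""
def pvSnip (event : List (String × Option String)) : String :=
  (((PySem.Dict.mk event).get? "snippet").bind id).getD ""

def pvAStep (seen : PySem.Dict String (List (String × Option String)))
    (event : List (String × Option String)) : PySem.Dict String (List (String × Option String)) :=
  match pvHead? event with
  | none => seen
  | some h =>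
    let key := pvNorm h
    if seen.contains key = false then seen.insert key event
    else
      let existing := seen.getD key []
      if PySem.Str.len (pvSnip event) > PySem.Str.len (pvSnip existing) then
        seen.insert key event
      else seen

def dedup_cross_source_py (events : List (List (String × Option String))) : List (List (String × Option String)) :=
  (events.foldl pvAStep PySem.Dict.empty).values

-- ===== PORT B =====
-- groups.setdefault(key, []).append(event)  =  groups[key] = groups.get(key, []) + [event]  (Dict.modify)
def pvBStep (groups : PySem.Dict String (List (List (String × Option String))))
    (event : List (String × Option String)) : PySem.Dict String (List (List (String × Option String))) :=
  match pvHead? event with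
  | none => groups
  | some h => groups.modify (pvNorm h) [] (fun g => g ++ [event])

-- max(g, key=lambda e: len(e.get("snippet") or "")) : first maximal element ([] guard unreachable)
def pvBestOf (x : List (String × Option String)) (xs : List (List (String × Option String))) :
    List (String × Option String) :=
  xs.foldl (fun best e => if PySem.Str.len (pvSnip e) > PySem.Str.len (pvSnip best) then e else best) x

def pvReduce (g : List (List (String × Option String))) : List (String × Option String) :=
  match g with
  | [] => []
  | x :: xs => pvBestOf x xs

def dedup_cross_source_py_alt (events : List (List (String × Option String))) : List (List (String × Option String)) :=
  let groups := events.foldl pvBStep PySem.Dict.empty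
  groups.values.map pvReduce

-- ===== PRECONDITION & SPEC =====
def Spec_dedup_cross_source_py (events : List (List (String × Option String))) (out : List (List (String × Option String))) : Prop := out = dedup_cross_source_py_alt events
instance (events : List (List (String × Option String))) (out : List (List (String × Option String))) : Decidable (Spec_dedup_cross_source_py events out) := by unfold Spec_dedup_cross_source_py; infer_instance

-- ===== CLAIM (what is proved, stated in full; the proofs are below) =====
def Claim_equal_dedup_cross_source_py : Prop := ∀ (events : List (List (String × Option String))), Dom_dedup_cross_source_py events → Spec_dedup_cross_source_py events (dedup_cross_source_py events)

-- ===== LEMMAS AND PROOFS =====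
theorem pvReduce_append (x : List (String × Option String)) (xs : List (List (String × Option String)))
    (e : List (String × Option String)) :
    pvReduce (x :: (xs ++ [e])) =
      if PySem.Str.len (pvSnip e) > PySem.Str.len (pvSnip (pvReduce (x :: xs))) then e
      else pvReduce (x :: xs) := by
  simp [pvReduce, pvBestOf, List.foldl_append]

theorem pvKeys_eq (d : PySem.Dict String (List (String × Option String)))
    (g : PySem.Dict String (List (List (String × Option String))))
    (hit : d.items = g.items.map (fun p => (p.1, pvReduce p.2))) :
    d.keys = g.keys := by
  simp [PySem.Dict.keys, hit, Function.comp]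

theorem pvInv (events : List (List (String × Option String)))
    (d : PySem.Dict String (List (String × Option String)))
    (g : PySem.Dict String (List (List (String × Option String))))
    (hnd : g.keys.Nodup)
    (hne : ∀ p ∈ g.items, p.2 ≠ [])
    (hit : d.items = g.items.map (fun p => (p.1, pvReduce p.2))) :
    (events.foldl pvAStep d).items =
      (events.foldl pvBStep g).items.map (fun p => (p.1, pvReduce p.2)) := by
  induction events generalizing d g with
  | nil => simpa using hit
  | cons e rest ih =>
    simp only [List.foldl_cons]
    have hdk : d.keys = g.keys := pvKeys_eq d g hit
    have hdnd : d.keys.Nodup := by rw [hdk]; exact hnd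
    have hcont : ∀ k, d.contains k = g.contains k := by
      intro k
      rw [PySem.Dict.contains_eq_decide_mem_keys, PySem.Dict.contains_eq_decide_mem_keys, hdk]
    cases hh : pvHead? e with
    | none =>
      rw [show pvAStep d e = d from by simp [pvAStep, hh],
          show pvBStep g e = g from by simp [pvBStep, hh]]
      exact ih d g hnd hne hit
    | some h =>
      by_cases hc : g.contains (pvNorm h) = true
      · -- key already present: B appends to the bucket, A keeps the longer-snippet event
        obtain ⟨gl, hgl⟩ : ∃ gl, g.get? (pvNorm h) = some gl := by
          have := PySem.Dict.contains_eq_isSome_get? (d := g) (k := pvNorm h)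
          rw [hc] at this
          exact Option.isSome_iff_exists.mp this.symm
        have hglmem : (pvNorm h, gl) ∈ g.items := PySem.Dict.mem_items_of_get?_eq_some g hgl
        have hglne : gl ≠ [] := hne _ hglmem
        obtain ⟨x, xs, rfl⟩ : ∃ x xs, gl = x :: xs := by
          cases gl with
          | nil => exact absurd rfl hglne
          | cons x xs => exact ⟨x, xs, rfl⟩
        have hgetDg : g.getD (pvNorm h) [] = x :: xs := PySem.Dict.getD_of_get?_eq_some g [] hgl
        have hdget : d.get? (pvNorm h) = some (pvReduce (x :: xs)) := by
          refine PySem.Dict.get?_of_mem_items d ?_ hdnd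
          have h2 := List.mem_map_of_mem (f := fun p => (p.1, pvReduce p.2)) hglmem
          rw [← hit] at h2
          exact h2
        have hgetDd : d.getD (pvNorm h) [] = pvReduce (x :: xs) := PySem.Dict.getD_of_get?_eq_some d [] hdget
        have hdc : d.contains (pvNorm h) = true := (hcont (pvNorm h)).trans hc
        have hBmod : pvBStep g e = g.insert (pvNorm h) ((x :: xs) ++ [e]) := by
          simp only [pvBStep, hh, PySem.Dict.modify, hgetDg]
        have hnd' : (g.insert (pvNorm h) ((x :: xs) ++ [e])).keys.Nodup :=
          PySem.Dict.nodup_keys_insert g _ _ hnd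
        have hne' : ∀ p ∈ (g.insert (pvNorm h) ((x :: xs) ++ [e])).items, p.2 ≠ [] := by
          intro p hp
          rcases (PySem.Dict.mem_items_insert g _ _ _).mp hp with h1 | h2
          · subst h1; simp
          · exact hne _ h2.1
        by_cases hlen : PySem.Str.len (pvSnip e) > PySem.Str.len (pvSnip (pvReduce (x :: xs)))
        · -- new snippet strictly longer: A replaces; reduce (bucket ++ [e]) = e
          have hA : pvAStep d e = d.insert (pvNorm h) e := by
            simp only [pvAStep, hh, hdc, hgetDd]
            rw [if_neg (by simp), if_pos hlen]
          rw [hA, hBmod]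
          apply ih _ _ hnd' hne'
          rw [PySem.Dict.items_insert_of_contains d _ hdc,
              PySem.Dict.items_insert_of_contains g _ hc, hit, List.map_map, List.map_map]
          apply List.map_congr_left
          intro p _
          by_cases hpk : (p.1 == pvNorm h) = true
          · have hlen' : (pvSnip (pvReduce (x :: xs))).length < (pvSnip e).length := by
              simpa [PySem.Str.len_eq] using hlen
            simp [Function.comp, hpk, pvReduce_append]
            intro hle
            exact absurd hle (by omega)
          · simp [Function.comp, hpk]
        · -- not longer: A keeps its entry; reduce (bucket ++ [e]) = reduce bucket
          have hA : pvAStep d e = d := by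
            simp only [pvAStep, hh, hdc, hgetDd]
            rw [if_neg (by simp), if_neg hlen]
          rw [hA, hBmod]
          apply ih _ _ hnd' hne'
          rw [PySem.Dict.items_insert_of_contains g _ hc, List.map_map, hit]
          apply List.map_congr_left
          intro p hp
          by_cases hpk : (p.1 == pvNorm h) = true
          · have hpkey : p.1 = pvNorm h := by simpa using hpk
            have hpval : p.2 = x :: xs := by
              have h3 := PySem.Dict.get?_of_mem_items g (k := p.1) (v := p.2) hp hnd
              rw [hpkey, hgl] at h3
              exact (Option.some.inj h3).symm
            have hlen' : (pvSnip e).length ≤ (pvSnip (pvReduce (x :: xs))).length := by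
              have := hlen
              simp [PySem.Str.len_eq] at this
              omega
            simp [Function.comp, hpkey, hpval, pvReduce_append]
            intro hlt
            exact absurd hlt (by omega)
          · simp [Function.comp, hpk]
      · -- fresh key: both append a new entry
        have hdc : d.contains (pvNorm h) = false := by
          rw [hcont (pvNorm h)]; simpa using hc
        have hgc : g.contains (pvNorm h) = false := by simpa using hc
        have hgetDg : g.getD (pvNorm h) [] = [] := PySem.Dict.getD_of_not_contains g [] hgc
        have hA : pvAStep d e = d.insert (pvNorm h) e := by
          simp [pvAStep, hh, hdc]
        have hB : pvBStep g e = g.insert (pvNorm h) [e] := by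
          simp only [pvBStep, hh, PySem.Dict.modify, hgetDg]
          rfl
        rw [hA, hB]
        apply ih
        · exact PySem.Dict.nodup_keys_insert g _ _ hnd
        · intro p hp
          rcases (PySem.Dict.mem_items_insert g _ _ _).mp hp with h1 | h2
          · subst h1; simp
          · exact hne _ h2.1
        · rw [PySem.Dict.items_insert_of_not_contains d _ hdc,
            PySem.Dict.items_insert_of_not_contains g _ hgc, List.map_append, hit]
          simp [pvReduce, pvBestOf]

-- ===== VERDICT (by name: the statement is the Claim_ definition above) =====
theorem dedup_cross_source_py_spec : Claim_equal_dedup_cross_source_py := by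
  intro events _
  unfold Spec_dedup_cross_source_py dedup_cross_source_py dedup_cross_source_py_alt
  have h := pvInv events PySem.Dict.empty PySem.Dict.empty
    (by simp [PySem.Dict.keys, PySem.Dict.empty])
    (by intro p hp; simp [PySem.Dict.empty] at hp)
    (by simp [PySem.Dict.empty])
  simp only [PySem.Dict.values, h, List.map_map]
  rfl
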